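-- pv_equiv track=rewrite | github.com/Dunkaburk/gruprog_1 | grundlaggande_programvareutveckling/calculator/Calculator.py | pop_operators_in_paranthises
-- ===== SOURCE A (Python) =====
-- MISSING_OPERATOR: str = "Missing operator or parenthesis"
--
-- class TooManyParenthesis(IndexError):
--     pass
--
-- def pop_operators_in_paranthises(output_stack, operator_stack):
--     try:
--         while operator_stack[-1] != ")":
--             op = operator_stack.pop()
--             output_stack.append(op)
--     except IndexError:
--         raise TooManyParenthesis(MISSING_OPERATOR)
--
--     return output_stack, operator_stack
-- ===== SOURCE B (Python) =====
-- MISSING_OPERATOR: str = "Missing operator or parenthesis"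
--
-- class TooManyParenthesis(IndexError):
--     pass
--
-- def pop_operators_in_paranthises(output_stack, operator_stack):
--     # Locate the nearest ")" from the top, then bulk-move the suffix above it.
--     rev = operator_stack[::-1]
--     try:
--         i = rev.index(")")
--     except ValueError:
--         raise TooManyParenthesis(MISSING_OPERATOR)
--     output_stack.extend(rev[:i])
--     del operator_stack[len(operator_stack) - i:]
--     return output_stack, operator_stack
-- ===== Notes on version B (the rewrite author's own statement) =====
-- stated objective: alternative
-- what changed: B replaces A's pop-one/peek while-loop by locating the index of the nearest ')' from the top (list.index on the reversed stack) and bulk-moving the whole suffix with extend and a slice deletion, raising TooManyParenthesis when no ')' exists.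
import Mathlib
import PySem

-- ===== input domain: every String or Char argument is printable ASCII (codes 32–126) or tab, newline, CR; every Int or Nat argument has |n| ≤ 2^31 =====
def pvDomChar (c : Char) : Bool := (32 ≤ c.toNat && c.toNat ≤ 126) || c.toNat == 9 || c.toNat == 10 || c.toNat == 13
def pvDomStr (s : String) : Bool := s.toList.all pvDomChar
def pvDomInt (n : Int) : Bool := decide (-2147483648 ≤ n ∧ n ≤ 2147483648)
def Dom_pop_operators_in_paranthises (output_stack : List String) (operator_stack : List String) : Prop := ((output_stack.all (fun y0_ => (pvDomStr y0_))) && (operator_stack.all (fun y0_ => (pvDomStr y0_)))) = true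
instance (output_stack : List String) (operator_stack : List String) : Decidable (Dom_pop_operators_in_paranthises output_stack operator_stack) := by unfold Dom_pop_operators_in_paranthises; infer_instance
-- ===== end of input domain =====

-- B replaces A's one-at-a-time pop/peek loop by locating the nearest ")" from the top and bulk-moving
-- the suffix (objective: alternative decomposition). Python A and B mutate the two list arguments in
-- place; the equivalence proved here is about the returned pair of values.

-- ===== PORT A =====
-- A's while-loop pops from the END of operator_stack; the port runs the same loop
-- over the reversed stack (top first), same state (output_stack, remaining stack).
def popsA : List String → List String → List String × List String
  | out, [] => (out, [])                -- IndexError path: A raises TooManyParenthesis (outside Pre_)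
  | out, x :: rest =>
    if x = ")" then (out, (x :: rest).reverse)
    else popsA (out ++ [x]) rest

def pop_operators_in_paranthises (output_stack : List String) (operator_stack : List String) : List String × List String :=
  popsA output_stack operator_stack.reverse

-- ===== PORT B =====
def pop_operators_in_paranthises_alt (output_stack : List String) (operator_stack : List String) : List String × List String :=
  match PySem.List.index? operator_stack.reverse ")" with
  | none => (output_stack, operator_stack)   -- B raises TooManyParenthesis here (outside Pre_)
  | some i => (output_stack ++ operator_stack.reverse.take i, operator_stack.take (operator_stack.length - i))

-- ===== PRECONDITION & SPEC =====
-- Pre_ excludes exactly the stacks containing no ")": there A (and B) raise TooManyParenthesis.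
def Pre_pop_operators_in_paranthises (output_stack : List String) (operator_stack : List String) : Prop :=
  ")" ∈ operator_stack
instance (output_stack : List String) (operator_stack : List String) : Decidable (Pre_pop_operators_in_paranthises output_stack operator_stack) := by unfold Pre_pop_operators_in_paranthises; infer_instance

def pvWitness_pop_operators_in_paranthises : List String × List String := (["1"], ["(", ")", "+", "*"])

def Spec_pop_operators_in_paranthises (output_stack : List String) (operator_stack : List String) (out : List String × List String) : Prop := out = pop_operators_in_paranthises_alt output_stack operator_stack
instance (output_stack : List String) (operator_stack : List String) (out : List String × List String) : Decidable (Spec_pop_operators_in_paranthises output_stack operator_stack out) := by unfold Spec_pop_operators_in_paranthises; infer_instance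

-- ===== CLAIM (what is proved, stated in full; the proofs are below) =====
def Claim_equal_pop_operators_in_paranthises : Prop := ∀ (output_stack : List String) (operator_stack : List String), Dom_pop_operators_in_paranthises output_stack operator_stack → Pre_pop_operators_in_paranthises output_stack operator_stack → Spec_pop_operators_in_paranthises output_stack operator_stack (pop_operators_in_paranthises output_stack operator_stack)

-- ===== LEMMAS AND PROOFS =====
lemma popsA_eq_index (rev : List String) : ∀ (out : List String) (k : Nat),
    PySem.List.index? rev ")" = some k →
    popsA out rev = (out ++ rev.take k, (rev.drop k).reverse) := by
  induction rev with
  | nil => intro out k h; simp [PySem.List.index?_eq_idxOf?] at h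
  | cons x rest ih =>
    intro out k h
    by_cases hx : x = ")"
    · subst hx
      rw [PySem.List.index?_cons_self] at h
      cases h
      simp [popsA]
    · rw [PySem.List.index?_cons_of_ne rest hx] at h
      cases hk : PySem.List.index? rest ")" with
      | none => rw [hk] at h; simp at h
      | some j =>
        rw [hk] at h
        simp at h
        subst h
        simp [popsA, hx, ih _ _ hk]

-- ===== VERDICT (by name: the statement is the Claim_ definition above) =====
theorem pop_operators_in_paranthises_spec : Claim_equal_pop_operators_in_paranthises := by
  intro out op _ hpre
  unfold Spec_pop_operators_in_paranthises
  have hrev : ")" ∈ op.reverse := List.mem_reverse.mpr hpre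
  have hsome : (PySem.List.index? op.reverse ")").isSome :=
    (PySem.List.index?_isSome_iff _ _).mpr hrev
  obtain ⟨k, hk⟩ := Option.isSome_iff_exists.mp hsome
  unfold pop_operators_in_paranthises pop_operators_in_paranthises_alt
  rw [hk, popsA_eq_index _ _ _ hk]
  congr 1
  rw [List.reverse_drop, List.reverse_reverse, List.length_reverse]
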